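-- pv_equiv track=rewrite | github.com/eastzone/atpg | atpg/headerspace/hs.py | byte_array_to_hs_string
-- ===== SOURCE A (Python) =====
-- def byte_array_to_hs_string(byte_array):
--     if byte_array == None:
--         return "None"
--     str = ""
--     for b in byte_array:
--         for i in range(4):
--             b_shift = b >> (i * 2)
--             next_bit = b_shift & 0x03
--             if (next_bit == 0x01):
--                 str = "0" + str
--             elif (next_bit == 0x02):
--                 str = "1" + str
--             elif (next_bit == 0x03):
--                 str = "x" + str
--             else:
--                 str = "z" + str
--     return str
-- ===== SOURCE B (Python) =====
-- _MAP = "z01x"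
-- _TABLE = [_MAP[(v >> 6) & 3] + _MAP[(v >> 4) & 3] + _MAP[(v >> 2) & 3] + _MAP[v & 3]
--           for v in range(256)]
--
-- def byte_array_to_hs_string(byte_array):
--     if byte_array == None:
--         return "None"
--     return "".join(_TABLE[b & 0xFF] for b in reversed(byte_array))
-- ===== Notes on version B (the rewrite author's own statement) =====
-- stated objective: faster
-- what changed: Replaces the nested per-byte bit-extraction loop with repeated string prepending by a precomputed 256-entry lookup table of 4-character blocks joined once over the bytes in reversed order.
import Mathlib
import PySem

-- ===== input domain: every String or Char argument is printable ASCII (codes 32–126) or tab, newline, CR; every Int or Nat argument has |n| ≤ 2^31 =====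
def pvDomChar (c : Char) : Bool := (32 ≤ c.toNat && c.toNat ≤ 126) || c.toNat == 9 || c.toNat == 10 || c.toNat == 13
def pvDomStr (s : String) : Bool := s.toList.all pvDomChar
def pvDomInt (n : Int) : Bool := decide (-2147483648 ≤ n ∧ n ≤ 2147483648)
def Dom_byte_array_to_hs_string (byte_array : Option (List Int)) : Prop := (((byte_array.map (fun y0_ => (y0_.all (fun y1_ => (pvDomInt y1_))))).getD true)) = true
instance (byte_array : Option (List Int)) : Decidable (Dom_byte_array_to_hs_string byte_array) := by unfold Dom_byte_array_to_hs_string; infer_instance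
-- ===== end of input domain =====

-- B replaces A's per-bit-pair inner loop with repeated string prepending by a precomputed
-- 256-entry per-byte block table indexed once per byte over the reversed array, joined once (objective: faster; measured).

-- ===== PORT A =====
-- strings are built on the List Char side (String.ofList at the end); '"0" + str' is the prepend '‹c› :: s'; '&' is PySem.Int.band
def byte_array_to_hs_string (byte_array : Option (List Int)) : String :=
  match byte_array with
  | none => "None"
  | some arr =>
    String.ofList <|
      arr.foldl (fun (s : List Char) (b : Int) =>
        (List.range 4).foldl (fun s i =>
          let b_shift : Int := b >>> (i * 2 : Nat)
          let next_bit : Int := PySem.Int.band b_shift 0x03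
          if next_bit = 0x01 then '0' :: s
          else if next_bit = 0x02 then '1' :: s
          else if next_bit = 0x03 then 'x' :: s
          else 'z' :: s) s) []

-- ===== PORT B =====
def pvHsMap : List Char := ['z', '0', '1', 'x']

def pvHsBlock (v : Nat) : List Char :=
  [pvHsMap.getD ((v >>> 6) &&& 3) 'z', pvHsMap.getD ((v >>> 4) &&& 3) 'z',
   pvHsMap.getD ((v >>> 2) &&& 3) 'z', pvHsMap.getD (v &&& 3) 'z']

def pvHsTable : List (List Char) := (List.range 256).map pvHsBlock

def byte_array_to_hs_string_alt (byte_array : Option (List Int)) : String :=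
  match byte_array with
  | none => "None"
  | some arr =>
    String.ofList ((arr.reverse.map (fun b => pvHsTable.getD (PySem.Int.band b 0xFF).toNat [])).flatten)

-- ===== PRECONDITION & SPEC =====
def Spec_byte_array_to_hs_string (byte_array : Option (List Int)) (out : String) : Prop := out = byte_array_to_hs_string_alt byte_array
instance (byte_array : Option (List Int)) (out : String) : Decidable (Spec_byte_array_to_hs_string byte_array out) := by unfold Spec_byte_array_to_hs_string; infer_instance

-- ===== CLAIM (what is proved, stated in full; the proofs are below) =====
def Claim_equal_byte_array_to_hs_string : Prop := ∀ (byte_array : Option (List Int)), Dom_byte_array_to_hs_string byte_array → Spec_byte_array_to_hs_string byte_array (byte_array_to_hs_string byte_array)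

-- ===== LEMMAS AND PROOFS =====

-- the character A prepends for a 2-bit field
def pvCharFor (next_bit : Int) : Char :=
  if next_bit = 1 then '0' else if next_bit = 2 then '1' else if next_bit = 3 then 'x' else 'z'

-- the block A's inner loop stacks up for one byte (most significant pair first)
def pvBlockA (b : Int) : List Char :=
  [pvCharFor (PySem.Int.band (b >>> (6:Nat)) 3), pvCharFor (PySem.Int.band (b >>> (4:Nat)) 3),
   pvCharFor (PySem.Int.band (b >>> (2:Nat)) 3), pvCharFor (PySem.Int.band (b >>> (0:Nat)) 3)]

lemma prepend_ite (nb : Int) (s : List Char) :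
    (if nb = 0x01 then '0' :: s else if nb = 0x02 then '1' :: s
     else if nb = 0x03 then 'x' :: s else 'z' :: s) = pvCharFor nb :: s := by
  unfold pvCharFor; split_ifs <;> rfl

lemma inner_fold (b : Int) (s : List Char) :
    (List.range 4).foldl (fun s i =>
      let b_shift : Int := b >>> (i * 2 : Nat)
      let next_bit : Int := PySem.Int.band b_shift 0x03
      if next_bit = 0x01 then '0' :: s
      else if next_bit = 0x02 then '1' :: s
      else if next_bit = 0x03 then 'x' :: s
      else 'z' :: s) s = pvBlockA b ++ s := by
  show (List.foldl _ s [0,1,2,3]) = _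
  simp only [List.foldl]
  rw [prepend_ite, prepend_ite, prepend_ite, prepend_ite]
  norm_num [pvBlockA]

lemma outer_fold (arr : List Int) (s : List Char) :
    arr.foldl (fun (s : List Char) (b : Int) =>
      (List.range 4).foldl (fun s i =>
        let b_shift : Int := b >>> (i * 2 : Nat)
        let next_bit : Int := PySem.Int.band b_shift 0x03
        if next_bit = 0x01 then '0' :: s
        else if next_bit = 0x02 then '1' :: s
        else if next_bit = 0x03 then 'x' :: s
        else 'z' :: s) s) s = (arr.reverse.map pvBlockA).flatten ++ s := by
  induction arr generalizing s with
  | nil => simp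
  | cons a l ih =>
    rw [List.foldl_cons, inner_fold, ih]
    simp

-- Python's 'x & (2^k - 1)' is 'x mod 2^k', including for negative x (two's complement)
lemma band_255 (x : Int) : PySem.Int.band x 255 = x % 256 := by
  unfold PySem.Int.band
  split_ifs with h1 h2 h3
  · have h := Nat.and_two_pow_sub_one_eq_mod x.toNat 8
    simp only [show (Int.toNat 255) = 255 from rfl]
    norm_num at h ⊢
    omega
  · norm_num at h2
  · have h := Nat.and_two_pow_sub_one_eq_mod (-x - 1).toNat 8
    rw [Nat.and_comm] at h
    simp only [show (Int.toNat 255) = 255 from rfl]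
    norm_num at h ⊢
    omega
  · norm_num at h3

lemma band_3 (x : Int) : PySem.Int.band x 3 = x % 4 := by
  unfold PySem.Int.band
  split_ifs with h1 h2 h3
  · have h := Nat.and_two_pow_sub_one_eq_mod x.toNat 2
    simp only [show (Int.toNat 3) = 3 from rfl]
    norm_num at h ⊢
    omega
  · norm_num at h2
  · have h := Nat.and_two_pow_sub_one_eq_mod (-x - 1).toNat 2
    rw [Nat.and_comm] at h
    simp only [show (Int.toNat 3) = 3 from rfl]
    norm_num at h ⊢
    omega
  · norm_num at h3

-- one 2-bit slot: A's field of b equals B's field of the masked byte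
lemma slot_eq (b : Int) (s : Nat) (hs : s = 0 ∨ s = 2 ∨ s = 4 ∨ s = 6) :
    PySem.Int.band (b >>> s) 3 = ((((PySem.Int.band b 255).toNat >>> s) &&& 3 : Nat) : Int) := by
  have hb : PySem.Int.band b 255 = b % 256 := band_255 b
  have hnn : 0 ≤ b % 256 := Int.emod_nonneg b (by norm_num)
  have hv : (((PySem.Int.band b 255).toNat : Int)) = b % 256 := by rw [hb]; omega
  rw [band_3, Int.shiftRight_eq_div_pow]
  have hn : ((((PySem.Int.band b 255).toNat >>> s) &&& 3 : Nat) : Int)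
      = ((b % 256) / ((2 ^ s : Nat) : Int)) % 4 := by
    rw [Nat.shiftRight_eq_div_pow, (by norm_num : (3 : Nat) = 2 ^ 2 - 1),
      Nat.and_two_pow_sub_one_eq_mod]
    push_cast
    rw [hv]
  rw [hn]
  rcases hs with h | h | h | h <;> subst h <;> norm_num <;> omega

lemma getD_map_range (f : Nat → List Char) (v : Nat) (hv : v < 256) :
    ((List.range 256).map f).getD v [] = f v := by
  rw [List.getD_eq_getElem _ _ (by simpa using hv)]
  simp

lemma char_slot (t : Nat) (ht : t < 4) : pvCharFor (t : Int) = pvHsMap.getD t 'z' := by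
  interval_cases t <;> decide

lemma block_eq (b : Int) : pvBlockA b = pvHsTable.getD (PySem.Int.band b 255).toNat [] := by
  have hb : PySem.Int.band b 255 = b % 256 := band_255 b
  have hvlt : (PySem.Int.band b 255).toNat < 256 := by
    have := Int.emod_lt_of_pos b (by norm_num : (0:Int) < 256)
    omega
  rw [pvHsTable, getD_map_range _ _ hvlt, pvHsBlock, pvBlockA]
  have hand : ∀ w : Nat, w &&& 3 < 4 := by
    intro w
    have := Nat.and_le_right (n := w) (m := 3)
    omega
  have step : ∀ s : Nat, s = 0 ∨ s = 2 ∨ s = 4 ∨ s = 6 →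
      pvCharFor (PySem.Int.band (b >>> s) 3)
        = pvHsMap.getD (((PySem.Int.band b 255).toNat >>> s) &&& 3) 'z' := by
    intro s hs
    rw [slot_eq b s hs, char_slot _ (hand _)]
  have h0 := step 0 (by norm_num)
  have h2 := step 2 (by norm_num)
  have h4 := step 4 (by norm_num)
  have h6 := step 6 (by norm_num)
  simp only [h0, h2, h4, h6, Nat.shiftRight_zero]

-- ===== VERDICT (by name: the statement is the Claim_ definition above) =====
theorem byte_array_to_hs_string_spec : Claim_equal_byte_array_to_hs_string := by
  intro byte_array _
  unfold Spec_byte_array_to_hs_string byte_array_to_hs_string byte_array_to_hs_string_alt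
  cases byte_array with
  | none => rfl
  | some arr =>
    simp only [outer_fold, List.append_nil]
    congr 1
    refine congrArg _ (List.map_congr_left fun b _ => ?_)
    exact block_eq b
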